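-- pv_equiv track=rewrite | github.com/gatersbolton/AutoFinance | standardize/routing/secondary_ocr.py | expected_benefit
-- ===== SOURCE A (Python) =====
-- from typing import Any, Dict, List, Tuple
--
-- def expected_benefit(reason_codes: List[str]) -> str:
--     if any(reason.startswith("conflict:") for reason in reason_codes):
--         return "resolve_provider_conflict"
--     if any(reason.startswith("validation:") for reason in reason_codes):
--         return "reduce_validation_failures"
--     if "mapping:unmapped" in reason_codes:
--         return "improve_mapping_readability"
--     if "quality:suspicious_numeric" in reason_codes:
--         return "improve_numeric_legibility"
--     return "improve_review_clarity"
-- ===== SOURCE B (Python) =====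
-- _PRIORITY = (
--     "resolve_provider_conflict",
--     "reduce_validation_failures",
--     "improve_mapping_readability",
--     "improve_numeric_legibility",
--     "improve_review_clarity",
-- )
--
-- def _rank(reason):
--     if reason.startswith("conflict:"):
--         return 0
--     if reason.startswith("validation:"):
--         return 1
--     if reason == "mapping:unmapped":
--         return 2
--     if reason == "quality:suspicious_numeric":
--         return 3
--     return 4
--
-- def expected_benefit(reason_codes):
--     return _PRIORITY[min(map(_rank, reason_codes), default=4)]
-- ===== Notes on version B (the rewrite author's own statement) =====
-- stated objective: alternative
-- what changed: Classify-then-aggregate: each code is mapped to a numeric priority rank, the minimum rank is taken over the list, and the answer is a table lookup by that rank, replacing A's four prioritized membership/prefix scans with one map/min/index pipeline.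
import Mathlib
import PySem

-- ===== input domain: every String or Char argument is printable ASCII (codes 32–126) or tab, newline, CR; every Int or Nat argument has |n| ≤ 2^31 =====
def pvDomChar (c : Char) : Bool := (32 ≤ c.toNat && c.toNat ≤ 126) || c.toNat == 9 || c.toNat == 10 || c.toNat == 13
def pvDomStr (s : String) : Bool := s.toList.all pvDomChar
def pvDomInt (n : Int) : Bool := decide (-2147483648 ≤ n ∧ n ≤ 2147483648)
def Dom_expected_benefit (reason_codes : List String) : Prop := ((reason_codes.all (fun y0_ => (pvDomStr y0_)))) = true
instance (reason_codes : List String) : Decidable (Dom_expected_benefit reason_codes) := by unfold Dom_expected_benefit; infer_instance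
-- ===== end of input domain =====

-- B replaces A's four prioritized scans with a classify/min/table-lookup pipeline (objective: alternative, same O(n) cost).


-- ===== PORT A =====
def expected_benefit (reason_codes : List String) : String :=
  if reason_codes.any (fun reason => PySem.Str.startswith reason "conflict:") then
    "resolve_provider_conflict"
  else if reason_codes.any (fun reason => PySem.Str.startswith reason "validation:") then
    "reduce_validation_failures"
  else if reason_codes.contains "mapping:unmapped" then
    "improve_mapping_readability"
  else if reason_codes.contains "quality:suspicious_numeric" then
    "improve_numeric_legibility"
  else
    "improve_review_clarity"

-- ===== PORT B =====
-- the priority table _PRIORITY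
def ebPriority : List String :=
  ["resolve_provider_conflict", "reduce_validation_failures",
   "improve_mapping_readability", "improve_numeric_legibility",
   "improve_review_clarity"]

-- _rank
def ebRank (reason : String) : Nat :=
  if PySem.Str.startswith reason "conflict:" then 0
  else if PySem.Str.startswith reason "validation:" then 1
  else if reason == "mapping:unmapped" then 2
  else if reason == "quality:suspicious_numeric" then 3
  else 4

-- Python's min(xs, default=d): min of a nonempty list, else the default
def ebMinD (xs : List Nat) (d : Nat) : Nat :=
  match xs with
  | [] => d
  | x :: t => t.foldl Nat.min x

def expected_benefit_alt (reason_codes : List String) : String :=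
  (PySem.List.pyGet? ebPriority (Int.ofNat (ebMinD (reason_codes.map ebRank) 4))).getD ""

-- ===== PRECONDITION & SPEC =====
def Spec_expected_benefit (reason_codes : List String) (out : String) : Prop := out = expected_benefit_alt reason_codes
instance (reason_codes : List String) (out : String) : Decidable (Spec_expected_benefit reason_codes out) := by unfold Spec_expected_benefit; infer_instance

-- ===== CLAIM (what is proved, stated in full; the proofs are below) =====
def Claim_equal_expected_benefit : Prop := ∀ (reason_codes : List String), Dom_expected_benefit reason_codes → Spec_expected_benefit reason_codes (expected_benefit reason_codes)

-- ===== LEMMAS AND PROOFS =====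

theorem ebRank_le_four (r : String) : ebRank r ≤ 4 := by
  unfold ebRank; split_ifs <;> omega

theorem foldl_min_le_iff (xs : List Nat) (a n : Nat) :
    xs.foldl Nat.min a ≤ n ↔ a ≤ n ∨ ∃ x ∈ xs, x ≤ n := by
  induction xs generalizing a with
  | nil => simp
  | cons x t ih =>
    simp only [List.foldl_cons, ih, min_le_iff, List.mem_cons]
    constructor
    · rintro (⟨h | h⟩ | ⟨y, hy, hle⟩)
      · exact Or.inl h
      · exact Or.inr ⟨x, Or.inl rfl, h⟩
      · exact Or.inr ⟨y, Or.inr hy, hle⟩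
    · rintro (h | ⟨y, (rfl | hy), hle⟩)
      · exact Or.inl (Or.inl h)
      · exact Or.inl (Or.inr hle)
      · exact Or.inr ⟨y, hy, hle⟩

theorem ebMinD_eq_foldl (l : List String) :
    ebMinD (l.map ebRank) 4 = (l.map ebRank).foldl Nat.min 4 := by
  cases l with
  | nil => rfl
  | cons x t =>
    simp only [List.map_cons, ebMinD, List.foldl_cons,
      Nat.min_eq_right (ebRank_le_four x)]

theorem best_le_iff (l : List String) (n : Nat) (hn : n < 4) :
    (l.map ebRank).foldl Nat.min 4 ≤ n ↔ ∃ r ∈ l, ebRank r ≤ n := by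
  rw [foldl_min_le_iff]
  simp only [List.mem_map]
  constructor
  · rintro (h | ⟨x, ⟨r, hr, rfl⟩, hle⟩)
    · omega
    · exact ⟨r, hr, hle⟩
  · rintro ⟨r, hr, hle⟩
    exact Or.inr ⟨ebRank r, ⟨r, hr, rfl⟩, hle⟩

theorem ebRankLe_zero (r : String) :
    ebRank r ≤ 0 ↔ PySem.Str.startswith r "conflict:" = true := by
  unfold ebRank; split_ifs <;> simp_all

theorem ebRankLe_one (r : String) :
    ebRank r ≤ 1 ↔ (PySem.Str.startswith r "conflict:" = true ∨
                    PySem.Str.startswith r "validation:" = true) := by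
  unfold ebRank; split_ifs <;> simp_all

theorem ebRankLe_two (r : String) :
    ebRank r ≤ 2 ↔ (PySem.Str.startswith r "conflict:" = true ∨
                    PySem.Str.startswith r "validation:" = true ∨
                    r = "mapping:unmapped") := by
  unfold ebRank; split_ifs <;> simp_all

theorem ebRankLe_three (r : String) :
    ebRank r ≤ 3 ↔ (PySem.Str.startswith r "conflict:" = true ∨
                    PySem.Str.startswith r "validation:" = true ∨
                    r = "mapping:unmapped" ∨
                    r = "quality:suspicious_numeric") := by
  unfold ebRank; split_ifs <;> simp_all

-- ===== VERDICT (by name: the statement is the Claim_ definition above) =====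
theorem expected_benefit_spec : Claim_equal_expected_benefit := by
  intro l _
  unfold Spec_expected_benefit expected_benefit expected_benefit_alt
  rw [ebMinD_eq_foldl]
  set b := (l.map ebRank).foldl Nat.min 4 with hb
  have h0 := (best_le_iff l 0 (by omega)).symm
  have h1 := (best_le_iff l 1 (by omega)).symm
  have h2 := (best_le_iff l 2 (by omega)).symm
  have h3 := (best_le_iff l 3 (by omega)).symm
  rw [← hb] at h0 h1 h2 h3
  split_ifs with c1 c2 c3 c4
  · -- some conflict ⇒ b = 0
    have : b ≤ 0 := by
      rw [← h0]
      obtain ⟨r, hr, hc⟩ := List.any_eq_true.mp c1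
      exact ⟨r, hr, (ebRankLe_zero r).mpr hc⟩
    have : b = 0 := by omega
    rw [this]; rfl
  · -- validation, no conflict ⇒ b = 1
    have hle : b ≤ 1 := by
      rw [← h1]
      obtain ⟨r, hr, hc⟩ := List.any_eq_true.mp c2
      exact ⟨r, hr, (ebRankLe_one r).mpr (Or.inr hc)⟩
    have hgt : ¬ b ≤ 0 := by
      rw [← h0]
      rintro ⟨r, hr, hle0⟩
      exact absurd (List.any_eq_true.mpr ⟨r, hr, (ebRankLe_zero r).mp hle0⟩) c1
    have : b = 1 := by omega
    rw [this]; rfl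
  · -- unmapped, no conflict/validation ⇒ b = 2
    have hle : b ≤ 2 := by
      rw [← h2]
      have hm : "mapping:unmapped" ∈ l := by
        simpa using c3
      exact ⟨_, hm, (ebRankLe_two _).mpr (Or.inr (Or.inr rfl))⟩
    have hgt : ¬ b ≤ 1 := by
      rw [← h1]
      rintro ⟨r, hr, hle1⟩
      rcases (ebRankLe_one r).mp hle1 with h | h
      · exact absurd (List.any_eq_true.mpr ⟨r, hr, h⟩) c1
      · exact absurd (List.any_eq_true.mpr ⟨r, hr, h⟩) c2
    have : b = 2 := by omega
    rw [this]; rfl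
  · -- suspicious, none above ⇒ b = 3
    have hle : b ≤ 3 := by
      rw [← h3]
      have hm : "quality:suspicious_numeric" ∈ l := by
        simpa using c4
      exact ⟨_, hm, (ebRankLe_three _).mpr (Or.inr (Or.inr (Or.inr rfl)))⟩
    have hgt : ¬ b ≤ 2 := by
      rw [← h2]
      rintro ⟨r, hr, hle2⟩
      rcases (ebRankLe_two r).mp hle2 with h | h | h
      · exact absurd (List.any_eq_true.mpr ⟨r, hr, h⟩) c1
      · exact absurd (List.any_eq_true.mpr ⟨r, hr, h⟩) c2
      · exact c3 (by simpa using (h ▸ hr : "mapping:unmapped" ∈ l))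
    have : b = 3 := by omega
    rw [this]; rfl
  · -- none ⇒ b = 4
    have hgt : ¬ b ≤ 3 := by
      rw [← h3]
      rintro ⟨r, hr, hle3⟩
      rcases (ebRankLe_three r).mp hle3 with h | h | h | h
      · exact absurd (List.any_eq_true.mpr ⟨r, hr, h⟩) c1
      · exact absurd (List.any_eq_true.mpr ⟨r, hr, h⟩) c2
      · exact c3 (by simpa using (h ▸ hr : "mapping:unmapped" ∈ l))
      · exact c4 (by simpa using (h ▸ hr : "quality:suspicious_numeric" ∈ l))
    have hle : b ≤ 4 := by
      rw [hb, foldl_min_le_iff]; exact Or.inl le_rfl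
    have : b = 4 := by omega
    rw [this]; rfl
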